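-- pv_equiv track=rewrite | github.com/inam-dev/a-levels-cs | Old/Jan 2021/RegistrationNumberCheck.py | ValidateRegistration
-- ===== SOURCE A (Python) =====
-- def ValidateRegistration(Registration): # Registration is String
--     p1, p2, p3 = 0, 0, 0        # Integer
--     regLen = len(Registration)  # Integer
--     c = ""           # String
--     result = False   # Boolean
--
--     if regLen < 6 or regLen > 9:
--         return False
--
--     for i in range(1, regLen+1):
--         c = Registration[i-1]
--
--         if i <= 3:
--             if c >= "A" and c <= "Z":
--                 p1 += 1
--
--         if i >= 4 and i <= 5:
--             if int(c) >= 0 and int(c) <= 9: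
--                 p2 += 1
--
--         if i >= 6:
--             if c >= "A" and c <= "Z":
--                 p3 += 1
--
--     if p1 == 3 and p2 == 2 and p3 == (regLen - 5):
--         result = True
--
--     return result
-- ===== SOURCE B (Python) =====
-- def ValidateRegistration(Registration):
--     n = len(Registration)
--     if n < 6 or n > 9:
--         return False
--     sig = ''.join('U' if 'A' <= c <= 'Z' else 'D' if '0' <= c <= '9' else '?'
--                   for c in Registration)
--     return sig == "UUUDDUUUU"[:n]
-- ===== Notes on version B (the rewrite author's own statement) =====
-- stated objective: alternative
-- what changed: A's indexed loop maintaining three position-dispatched counters is replaced by canonicalisation: map every character to its class ('U'/'D'/'?'), then compare the resulting signature string against one fixed template 'UUUDDUUUU' truncated to the length.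
-- outside the precondition, e.g. on ValidateRegistration('ABCX2DEF'): A raises ValueError, B returns False; on ValidateRegistration('UUUDDUUUU'): A raises ValueError, B returns False
import Mathlib
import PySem

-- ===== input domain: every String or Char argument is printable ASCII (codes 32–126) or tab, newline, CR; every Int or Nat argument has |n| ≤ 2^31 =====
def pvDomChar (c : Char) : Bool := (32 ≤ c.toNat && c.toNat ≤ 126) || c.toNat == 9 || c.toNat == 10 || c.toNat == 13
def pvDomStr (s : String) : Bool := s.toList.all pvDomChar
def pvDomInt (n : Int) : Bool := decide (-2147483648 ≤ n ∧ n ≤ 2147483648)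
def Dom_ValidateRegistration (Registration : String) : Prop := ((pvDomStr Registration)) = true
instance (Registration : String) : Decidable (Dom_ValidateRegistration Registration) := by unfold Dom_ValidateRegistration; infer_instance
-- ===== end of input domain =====

-- B replaces A's indexed loop with three position-dispatched counters by canonicalisation:
-- each character is mapped to its class character and the signature is compared with one
-- fixed template truncated to the length (same cost, different algorithm).

-- ===== PORT A =====
-- int(c) for a single char: exact where Python returns; Python raises ValueError where
-- ofChars? is none — those inputs are excluded by Pre_ValidateRegistration.
def pyIntChar (c : Char) : Int := (PySem.Int.ofChars? [c]).getD 0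

def ValidateRegistration (Registration : String) : Bool :=
  let l := Registration.toList
  let regLen : Int := (l.length : Int)
  if regLen < 6 || regLen > 9 then false
  else
    let st := (PySem.List.pyRange 1 (regLen + 1) 1).foldl
      (fun (s : Int × Int × Int) i =>
        let c := PySem.List.pyGetD l (i - 1) ' '
        (s.1 + (if i ≤ 3 ∧ ('A' ≤ c ∧ c ≤ 'Z') then 1 else 0),
         s.2.1 + (if (4 ≤ i ∧ i ≤ 5) ∧ (0 ≤ pyIntChar c ∧ pyIntChar c ≤ 9) then 1 else 0),
         s.2.2 + (if 6 ≤ i ∧ ('A' ≤ c ∧ c ≤ 'Z') then 1 else 0)))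
      ((0 : Int), (0 : Int), (0 : Int))
    decide (st.1 = 3 ∧ st.2.1 = 2 ∧ st.2.2 = regLen - 5)

-- ===== PORT B =====
-- character class: 'U' for uppercase letter, 'D' for decimal digit, '?' otherwise
def classChar (c : Char) : Char :=
  if 'A' ≤ c ∧ c ≤ 'Z' then 'U' else if '0' ≤ c ∧ c ≤ '9' then 'D' else '?'

def ValidateRegistration_alt (Registration : String) : Bool :=
  let l := Registration.toList
  let n : Int := (l.length : Int)
  if n < 6 || n > 9 then false
  else
    let sig := l.map classChar
    decide (sig = PySem.List.slice "UUUDDUUUU".toList none (some n))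

-- ===== PRECONDITION & SPEC =====
-- Pre_ excludes exactly the inputs where Python A raises ValueError (int(c) on a
-- non-digit character at positions 4-5 of a string of accepted length); Python B
-- returns False there (the class signature cannot match the template).
def Pre_ValidateRegistration (Registration : String) : Prop :=
  Registration.toList.length < 6 ∨ 9 < Registration.toList.length ∨
    (('0' ≤ Registration.toList.getD 3 ' ' ∧ Registration.toList.getD 3 ' ' ≤ '9') ∧
     ('0' ≤ Registration.toList.getD 4 ' ' ∧ Registration.toList.getD 4 ' ' ≤ '9'))
instance (Registration : String) : Decidable (Pre_ValidateRegistration Registration) := by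
  unfold Pre_ValidateRegistration; infer_instance

def pvWitness_ValidateRegistration : String := "ABC12XY"

def Spec_ValidateRegistration (Registration : String) (out : Bool) : Prop :=
  out = ValidateRegistration_alt Registration
instance (Registration : String) (out : Bool) : Decidable (Spec_ValidateRegistration Registration out) := by
  unfold Spec_ValidateRegistration; infer_instance

-- ===== CLAIM =====
def Claim_equal_ValidateRegistration : Prop := ∀ (Registration : String), Dom_ValidateRegistration Registration → Pre_ValidateRegistration Registration → Spec_ValidateRegistration Registration (ValidateRegistration Registration)

-- ===== LEMMAS AND PROOFS =====

theorem char_eq_of_toNat (c : Char) (n : Nat) (hn : c.toNat = n) : c = Char.ofNat n := by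
  subst hn; simp [Char.ofNat_toNat]

theorem digit_cases (c : Char) (h1 : '0' ≤ c) (h2 : c ≤ '9') :
    c.toNat = 48 ∨ c.toNat = 49 ∨ c.toNat = 50 ∨ c.toNat = 51 ∨ c.toNat = 52 ∨
    c.toNat = 53 ∨ c.toNat = 54 ∨ c.toNat = 55 ∨ c.toNat = 56 ∨ c.toNat = 57 := by
  rw [Char.le_def] at h1 h2
  rw [UInt32.le_iff_toNat_le] at h1 h2
  change 48 ≤ _ at h1; change _ ≤ 57 at h2
  unfold Char.toNat; omega

theorem digit_bounds (c : Char) (h1 : '0' ≤ c) (h2 : c ≤ '9') :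
    0 ≤ pyIntChar c ∧ pyIntChar c ≤ 9 := by
  rcases digit_cases c h1 h2 with h|h|h|h|h|h|h|h|h|h <;>
    rw [char_eq_of_toNat c _ h] <;> decide

theorem digit_class (c : Char) (h1 : '0' ≤ c) (h2 : c ≤ '9') : classChar c = 'D' := by
  rcases digit_cases c h1 h2 with h|h|h|h|h|h|h|h|h|h <;>
    rw [char_eq_of_toNat c _ h] <;> decide

theorem classChar_U (c : Char) : classChar c = 'U' ↔ ('A' ≤ c ∧ c ≤ 'Z') := by
  unfold classChar
  split_ifs with h1 h2 <;> simp [h1]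

set_option maxHeartbeats 2000000 in
theorem ports_eq (Registration : String)
    (hpre : Pre_ValidateRegistration Registration) :
    ValidateRegistration Registration = ValidateRegistration_alt Registration := by
  unfold ValidateRegistration ValidateRegistration_alt
  unfold Pre_ValidateRegistration at hpre
  generalize hl : Registration.toList = l at hpre
  clear hl
  rcases l with _|⟨a, _|⟨b, _|⟨c, _|⟨d, _|⟨e, _|⟨f, t⟩⟩⟩⟩⟩⟩
  case nil => simp
  case cons.nil => simp
  case cons.cons.nil => simp
  case cons.cons.cons.nil => simp
  case cons.cons.cons.cons.nil => simp
  case cons.cons.cons.cons.cons.nil => simp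
  simp only [List.getD, List.getElem?_cons_succ, List.getElem?_cons_zero,
    Option.getD_some, List.length_cons] at hpre
  rcases t with _|⟨g, _|⟨h, _|⟨i, _|⟨j, t⟩⟩⟩⟩
  case cons.cons.cons.cons.cons.cons.cons.cons.cons.cons =>
    have h9 : (9:Int) < (((a::b::c::d::e::f::g::h::i::j::t).length : Nat) : Int) := by
      simp [List.length_cons]; omega
    rw [if_pos, if_pos] <;> simp [List.length_cons] <;> omega
  case cons.cons.cons.cons.cons.cons.nil =>
    simp only [List.length_nil, List.length_cons] at hpre
    rcases hpre with hpre|hpre|⟨⟨hd1,hd2⟩,⟨he1,he2⟩⟩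
    · omega
    · omega
    obtain ⟨hdl, hdr⟩ := digit_bounds d hd1 hd2
    obtain ⟨hel, her⟩ := digit_bounds e he1 he2
    have hdc := digit_class d hd1 hd2
    have hec := digit_class e he1 he2
    have hr : PySem.List.pyRange 1 (7:Int) 1 = [1,2,3,4,5,6] := by decide
    have hsl : PySem.List.slice "UUUDDUUUU".toList none (some (6:Int)) = ['U','U','U','D','D','U'] := by decide
    norm_num [hr, hsl, List.foldl, PySem.List.pyGetD, PySem.List.pyIdx?,
      hdl, hdr, hel, her, hdc, hec, classChar_U,
      (show Int.toNat 2 = 2 from rfl),(show Int.toNat 3 = 3 from rfl),(show Int.toNat 4 = 4 from rfl),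
      (show Int.toNat 5 = 5 from rfl)]
    split_ifs <;> simp_all
  case cons.cons.cons.cons.cons.cons.cons.nil =>
    simp only [List.length_nil, List.length_cons] at hpre
    rcases hpre with hpre|hpre|⟨⟨hd1,hd2⟩,⟨he1,he2⟩⟩
    · omega
    · omega
    obtain ⟨hdl, hdr⟩ := digit_bounds d hd1 hd2
    obtain ⟨hel, her⟩ := digit_bounds e he1 he2
    have hdc := digit_class d hd1 hd2
    have hec := digit_class e he1 he2
    have hr : PySem.List.pyRange 1 (8:Int) 1 = [1,2,3,4,5,6,7] := by decide
    have hsl : PySem.List.slice "UUUDDUUUU".toList none (some (7:Int)) = ['U','U','U','D','D','U','U'] := by decide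
    norm_num [hr, hsl, List.foldl, PySem.List.pyGetD, PySem.List.pyIdx?,
      hdl, hdr, hel, her, hdc, hec, classChar_U,
      (show Int.toNat 2 = 2 from rfl),(show Int.toNat 3 = 3 from rfl),(show Int.toNat 4 = 4 from rfl),
      (show Int.toNat 5 = 5 from rfl),(show Int.toNat 6 = 6 from rfl)]
    split_ifs <;> simp_all
  case cons.cons.cons.cons.cons.cons.cons.cons.nil =>
    simp only [List.length_nil, List.length_cons] at hpre
    rcases hpre with hpre|hpre|⟨⟨hd1,hd2⟩,⟨he1,he2⟩⟩
    · omega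
    · omega
    obtain ⟨hdl, hdr⟩ := digit_bounds d hd1 hd2
    obtain ⟨hel, her⟩ := digit_bounds e he1 he2
    have hdc := digit_class d hd1 hd2
    have hec := digit_class e he1 he2
    have hr : PySem.List.pyRange 1 (9:Int) 1 = [1,2,3,4,5,6,7,8] := by decide
    have hsl : PySem.List.slice "UUUDDUUUU".toList none (some (8:Int)) = ['U','U','U','D','D','U','U','U'] := by decide
    norm_num [hr, hsl, List.foldl, PySem.List.pyGetD, PySem.List.pyIdx?,
      hdl, hdr, hel, her, hdc, hec, classChar_U,
      (show Int.toNat 2 = 2 from rfl),(show Int.toNat 3 = 3 from rfl),(show Int.toNat 4 = 4 from rfl),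
      (show Int.toNat 5 = 5 from rfl),(show Int.toNat 6 = 6 from rfl),(show Int.toNat 7 = 7 from rfl)]
    split_ifs <;> simp_all
  case cons.cons.cons.cons.cons.cons.cons.cons.cons.nil =>
    simp only [List.length_nil, List.length_cons] at hpre
    rcases hpre with hpre|hpre|⟨⟨hd1,hd2⟩,⟨he1,he2⟩⟩
    · omega
    · omega
    obtain ⟨hdl, hdr⟩ := digit_bounds d hd1 hd2
    obtain ⟨hel, her⟩ := digit_bounds e he1 he2
    have hdc := digit_class d hd1 hd2
    have hec := digit_class e he1 he2
    have hr : PySem.List.pyRange 1 (10:Int) 1 = [1,2,3,4,5,6,7,8,9] := by decide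
    have hsl : PySem.List.slice "UUUDDUUUU".toList none (some (9:Int)) = ['U','U','U','D','D','U','U','U','U'] := by decide
    norm_num [hr, hsl, List.foldl, PySem.List.pyGetD, PySem.List.pyIdx?,
      hdl, hdr, hel, her, hdc, hec, classChar_U,
      (show Int.toNat 2 = 2 from rfl),(show Int.toNat 3 = 3 from rfl),(show Int.toNat 4 = 4 from rfl),
      (show Int.toNat 5 = 5 from rfl),(show Int.toNat 6 = 6 from rfl),(show Int.toNat 7 = 7 from rfl),
      (show Int.toNat 8 = 8 from rfl)]
    split_ifs <;> simp_all

-- ===== VERDICT =====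
theorem ValidateRegistration_spec : Claim_equal_ValidateRegistration := by
  intro Registration _ hpre
  unfold Spec_ValidateRegistration
  exact ports_eq Registration hpre
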